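-- pv_equiv track=rewrite | github.com/Amryu/Entropia-Nexus | client/ocr/stpk_text_reader.py | _merge_narrow_pairs
-- ===== SOURCE A (Python) =====
-- def _merge_narrow_pairs(
--     blobs: list[tuple[int, int]],
-- ) -> list[tuple[int, int]]:
--     """Merge pairs of very narrow, closely-spaced blobs.
--
--     Characters like '"' are rendered as two separate tick marks with a
--     small gap. Merges adjacent blobs where both are <= 2px wide and
--     the gap between them is <= 2px.
--     """
--     if len(blobs) < 2:
--         return blobs
--
--     MAX_TICK_W = 2
--     MAX_GAP = 2
--
--     result: list[tuple[int, int]] = []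
--     i = 0
--     while i < len(blobs):
--         if i + 1 < len(blobs):
--             x0a, x1a = blobs[i]
--             x0b, x1b = blobs[i + 1]
--             wa = x1a - x0a + 1
--             wb = x1b - x0b + 1
--             gap = x0b - x1a - 1
--             if wa <= MAX_TICK_W and wb <= MAX_TICK_W and gap <= MAX_GAP:
--                 result.append((x0a, x1b))
--                 i += 2
--                 continue
--         result.append(blobs[i])
--         i += 1
--     return result
-- ===== SOURCE B (Python) =====
-- def _merge_narrow_pairs(
--     blobs: list[tuple[int, int]],
-- ) -> list[tuple[int, int]]:
--     if len(blobs) < 2: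
--         return blobs
--
--     MAX_TICK_W = 2
--     MAX_GAP = 2
--
--     # Stage 1: for every adjacent pair, the merged blob if the pair qualifies, else None.
--     cand = [
--         (x0a, x1b)
--         if (x1a - x0a + 1 <= MAX_TICK_W
--             and x1b - x0b + 1 <= MAX_TICK_W
--             and x0b - x1a - 1 <= MAX_GAP)
--         else None
--         for (x0a, x1a), (x0b, x1b) in zip(blobs, blobs[1:])
--     ]
--
--     # Stage 2: greedy left-to-right selection — a pair is merged iff it qualifies
--     # and the pair immediately before it was not merged (merges never chain).
--     sel = []
--     prev = None
--     for c in cand: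
--         prev = c if (c is not None and prev is None) else None
--         sel.append(prev)
--
--     # Stage 3: emit — skip blobs consumed by the merge one position earlier,
--     # emit the merged blob where a merge starts, the blob itself otherwise.
--     out = []
--     for b, here, before in zip(blobs, sel + [None], [None] + sel):
--         if before is not None:
--             continue
--         out.append(here if here is not None else b)
--     return out
-- ===== Notes on version B (the rewrite author's own statement) =====
-- stated objective: alternative
-- what changed: A's single emit-as-you-go index loop with lookahead and a two-step skip is replaced by three staged passes over precomputed lists: (1) the merged candidate for every adjacent pair via zip, (2) a greedy selection scan resolving chaining (a pair is selected iff it qualifies and the previous pair was not selected), (3) emission by zipping blobs with the selection list shifted both ways.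
import Mathlib
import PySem

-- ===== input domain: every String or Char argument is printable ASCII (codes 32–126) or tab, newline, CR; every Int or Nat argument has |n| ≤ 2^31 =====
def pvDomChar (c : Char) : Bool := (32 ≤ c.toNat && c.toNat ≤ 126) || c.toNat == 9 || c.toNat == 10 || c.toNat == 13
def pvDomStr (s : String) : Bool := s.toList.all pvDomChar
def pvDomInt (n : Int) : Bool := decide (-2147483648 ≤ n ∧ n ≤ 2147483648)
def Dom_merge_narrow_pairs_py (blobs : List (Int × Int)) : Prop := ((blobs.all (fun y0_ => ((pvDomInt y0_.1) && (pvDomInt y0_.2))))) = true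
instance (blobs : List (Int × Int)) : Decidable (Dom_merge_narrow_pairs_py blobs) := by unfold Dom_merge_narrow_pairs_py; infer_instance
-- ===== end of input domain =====

-- B replaces A's emit-as-you-go index loop (lookahead + two-step skip) by three staged
-- passes: merged candidates per adjacent pair, a greedy selection scan, then emission
-- (objective: alternative decomposition, same O(n) cost).

-- ===== PORT A =====
-- A's while loop: looks at blobs[i] and (if present) blobs[i+1]; on a merge it advances
-- i by 2, else by 1.  Transcribed as structural recursion on the remaining suffix.
def mergeLoopA : List (Int × Int) → List (Int × Int)
  | [] => []
  | [a] => [a]   -- i + 1 < len(blobs) fails: append blobs[i], i += 1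
  | (x0a, x1a) :: (x0b, x1b) :: rest =>
      if x1a - x0a + 1 ≤ 2 ∧ x1b - x0b + 1 ≤ 2 ∧ x0b - x1a - 1 ≤ 2 then
        (x0a, x1b) :: mergeLoopA rest
      else
        (x0a, x1a) :: mergeLoopA ((x0b, x1b) :: rest)

def merge_narrow_pairs_py (blobs : List (Int × Int)) : List (Int × Int) :=
  if blobs.length < 2 then blobs else mergeLoopA blobs

-- ===== PORT B =====
-- Stage 1: for each adjacent pair (zip blobs blobs[1:]) the merged blob, or none.
def candList (blobs : List (Int × Int)) : List (Option (Int × Int)) :=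
  (blobs.zip blobs.tail).map
    (fun p => if p.1.2 - p.1.1 + 1 ≤ 2 ∧ p.2.2 - p.2.1 + 1 ≤ 2 ∧ p.2.1 - p.1.2 - 1 ≤ 2
              then some (p.1.1, p.2.2) else none)

-- Stage 2: the scan 'prev = c if (c is not None and prev is None) else None; sel.append(prev)'.
def selAux : Option (Int × Int) → List (Option (Int × Int)) → List (Option (Int × Int))
  | _, [] => []
  | prev, c :: cs =>
      let p := if c.isSome ∧ prev = none then c else none
      p :: selAux p cs

-- Stage 3: zip blobs with the selection shifted both ways; skip consumed blobs, emit
-- the merged blob where a merge starts, the blob itself otherwise (loop with continue = filterMap).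
def merge_narrow_pairs_py_alt (blobs : List (Int × Int)) : List (Int × Int) :=
  if blobs.length < 2 then blobs
  else
    let sel := selAux none (candList blobs)
    ((blobs.zip (sel ++ [none])).zip (none :: sel)).filterMap
      (fun p => if p.2.isSome then none else some (p.1.2.getD p.1.1))

-- ===== PRECONDITION & SPEC =====
def Spec_merge_narrow_pairs_py (blobs : List (Int × Int)) (out : List (Int × Int)) : Prop := out = merge_narrow_pairs_py_alt blobs
instance (blobs : List (Int × Int)) (out : List (Int × Int)) : Decidable (Spec_merge_narrow_pairs_py blobs out) := by unfold Spec_merge_narrow_pairs_py; infer_instance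

-- ===== CLAIM (what is proved, stated in full; the proofs are below) =====
def Claim_equal_merge_narrow_pairs_py : Prop := ∀ (blobs : List (Int × Int)), Dom_merge_narrow_pairs_py blobs → Spec_merge_narrow_pairs_py blobs (merge_narrow_pairs_py blobs)

-- ===== LEMMAS AND PROOFS =====

-- B's three stages, composed (without the <2 guard).
def altOut (blobs : List (Int × Int)) : List (Int × Int) :=
  let sel := selAux none (candList blobs)
  ((blobs.zip (sel ++ [none])).zip (none :: sel)).filterMap
    (fun p => if p.2.isSome then none else some (p.1.2.getD p.1.1))

theorem candList_cons (a b : Int × Int) (r : List (Int × Int)) :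
    candList (a :: b :: r) =
      (if a.2 - a.1 + 1 ≤ 2 ∧ b.2 - b.1 + 1 ≤ 2 ∧ b.1 - a.2 - 1 ≤ 2
       then some (a.1, b.2) else none) :: candList (b :: r) := by
  cases r <;> simp [candList]

theorem sel_false (a b : Int × Int) (r : List (Int × Int))
    (h : ¬ (a.2 - a.1 + 1 ≤ 2 ∧ b.2 - b.1 + 1 ≤ 2 ∧ b.1 - a.2 - 1 ≤ 2)) :
    selAux none (candList (a :: b :: r)) = none :: selAux none (candList (b :: r)) := by
  rw [candList_cons, if_neg h]
  simp [selAux]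

theorem sel_true_nil (a b : Int × Int)
    (h : a.2 - a.1 + 1 ≤ 2 ∧ b.2 - b.1 + 1 ≤ 2 ∧ b.1 - a.2 - 1 ≤ 2) :
    selAux none (candList [a, b]) = [some (a.1, b.2)] := by
  rw [candList_cons, if_pos h]
  simp [candList, selAux]

theorem sel_true_cons (a b c : Int × Int) (r : List (Int × Int))
    (h : a.2 - a.1 + 1 ≤ 2 ∧ b.2 - b.1 + 1 ≤ 2 ∧ b.1 - a.2 - 1 ≤ 2) :
    selAux none (candList (a :: b :: c :: r)) =
      some (a.1, b.2) :: none :: selAux none (candList (c :: r)) := by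
  rw [candList_cons, if_pos h, candList_cons]
  simp [selAux]

theorem altOut_eq (blobs : List (Int × Int)) : altOut blobs = mergeLoopA blobs := by
  induction blobs using mergeLoopA.induct with
  | case1 => rfl
  | case2 a => rfl
  | case3 x0a x1a x0b x1b rest h ih =>
      cases rest with
      | nil =>
          rw [mergeLoopA, if_pos h]
          simp [altOut, sel_true_nil (x0a,x1a) (x0b,x1b) h, mergeLoopA]
      | cons c r2 =>
          rw [mergeLoopA, if_pos h]
          rw [← ih]
          simp [altOut, sel_true_cons (x0a,x1a) (x0b,x1b) c r2 h]
  | case4 x0a x1a x0b x1b rest h ih =>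
      rw [mergeLoopA, if_neg h, ← ih]
      simp [altOut, sel_false (x0a,x1a) (x0b,x1b) rest h]

-- ===== VERDICT (by name: the statement is the Claim_ definition above) =====
theorem merge_narrow_pairs_py_spec : Claim_equal_merge_narrow_pairs_py := by
  intro blobs _
  unfold Spec_merge_narrow_pairs_py merge_narrow_pairs_py merge_narrow_pairs_py_alt
  by_cases h : blobs.length < 2
  · simp [h]
  · simp only [if_neg h]
    exact (altOut_eq blobs).symm
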